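-- pv_equiv track=rewrite | github.com/prash-kr-meena/GoogleR | Aditya_Verma/Stack/Index__Greater_n_Smaller_Nums_To_Left_n_Right/NSL_Index.py | indexes_of_next_smaller_element_to_left
-- ===== SOURCE A (Python) =====
-- def indexes_of_next_smaller_element_to_left(nums):
--     length = len(nums)
--     result = [-1] * length  # Initializing all with -1 already
--     stack = []  # Using list as stack
--
--     for i in range(0, length):  # Going forward
--         curr = nums[i]
--
--         if len(stack) == 0:
--             result[i] = -1  # result is -1, when stack is empty
--
--         elif stack[-1][0] < curr:  # stack_top < curr element       Notice : compare-value
--             result[i] = stack[-1][1]  # result is stack_top         Notice : insert-index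
--
--         elif stack[-1][0] >= curr:  # stack_top >= curr element     Notice : compare-value
--             while len(stack) != 0 and stack[-1][0] >= curr:  # Notice : compare-value
--                 stack.pop()  # pop all elements greater then equal to curr, until the stack is empty
--
--             # By which of the above condition, the loop has ended
--             if len(stack) == 0:
--                 result[i] = -1  # result is -1      <similar to our 1st condition>
--             else:  # found an element smaller then curr_element
--                 result[i] = stack[-1][1]  # result is stack_top   <similar to our 2nd condition> Notice : insert-index
--
--         # Handled the current element, We have processed it
--         stack.append((curr, i))  # Notice  0: value, 1: index
--
--     return result
-- ===== SOURCE B (Python) =====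
-- def indexes_of_next_smaller_element_to_left(nums):
--     # Stack-free: result itself is a chain of previous-smaller pointers.
--     result = []
--     for i, x in enumerate(nums):
--         p = i - 1
--         while p != -1 and nums[p] >= x:
--             p = result[p]
--         result.append(p)
--     return result
-- ===== Notes on version B (the rewrite author's own statement) =====
-- stated objective: alternative
-- what changed: Replaces the explicit (value,index) stack with pointer-jumping through the result array itself: for each i, start at p=i-1 and follow p=result[p] while nums[p] >= nums[i].
import Mathlib
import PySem

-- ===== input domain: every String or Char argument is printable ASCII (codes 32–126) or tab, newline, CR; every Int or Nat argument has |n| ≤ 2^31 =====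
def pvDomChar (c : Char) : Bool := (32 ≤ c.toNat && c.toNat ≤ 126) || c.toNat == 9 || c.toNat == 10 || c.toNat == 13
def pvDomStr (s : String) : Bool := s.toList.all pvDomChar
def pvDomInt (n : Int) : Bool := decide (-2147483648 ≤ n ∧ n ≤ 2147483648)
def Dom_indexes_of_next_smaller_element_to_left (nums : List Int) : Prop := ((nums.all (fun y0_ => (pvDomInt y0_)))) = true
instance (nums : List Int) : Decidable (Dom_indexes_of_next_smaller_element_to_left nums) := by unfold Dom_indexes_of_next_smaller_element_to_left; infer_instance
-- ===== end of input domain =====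

-- B replaces A's explicit (value,index) stack by pointer-jumping through the result list itself
-- (p := i-1; while nums[p] >= nums[i]: p := result[p]); same amortized cost, no stack structure.

-- ===== PORT A =====
-- the inner 'while len(stack) != 0 and stack[-1][0] >= curr: stack.pop()' loop
-- (stack is kept head-as-top: Python's append/pop at the end = cons/tail at the head here)
def pvPopGE (curr : Int) : List (Int × Int) → List (Int × Int)
  | [] => []
  | (v, j) :: rest => if v ≥ curr then pvPopGE curr rest else (v, j) :: rest

-- one iteration of A's 'for i in range(0, length)' body; state = (result, stack)
def pvStepA (nums : List Int) (st : List Int × List (Int × Int)) (i : Int) :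
    List Int × List (Int × Int) :=
  let result := st.1
  let stack := st.2
  let curr := PySem.List.pyGetD nums i 0       -- nums[i]; i is always in range here
  match stack with
  | [] => (PySem.List.pySetD result i (-1), (curr, i) :: stack)
  | (v, j) :: _ =>
    if v < curr then
      (PySem.List.pySetD result i j, (curr, i) :: stack)
    else  -- stack[-1][0] >= curr
      let stack' := pvPopGE curr stack
      match stack' with
      | [] => (PySem.List.pySetD result i (-1), (curr, i) :: stack')
      | (_, j') :: _ => (PySem.List.pySetD result i j', (curr, i) :: stack')

def indexes_of_next_smaller_element_to_left (nums : List Int) : List Int :=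
  -- length = len(nums) inlined
  ((PySem.List.pyRange 0 (nums.length : Int)).foldl (pvStepA nums)
      (List.replicate nums.length (-1), [])).1

-- ===== PORT B =====
-- B's inner 'while p != -1 and nums[p] >= x: p = result[p]' loop; the fuel argument only
-- makes the recursion total (each jump strictly decreases p, so fuel = len(nums) is never exhausted)
def pvChase (nums result : List Int) (x : Int) : Int → Nat → Int
  | p, 0 => p
  | p, fuel + 1 =>
    if p ≠ -1 ∧ PySem.List.pyGetD nums p 0 ≥ x then
      pvChase nums result x (PySem.List.pyGetD result p 0) fuel
    else p

def indexes_of_next_smaller_element_to_left_alt (nums : List Int) : List Int :=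
  (List.range nums.length).foldl
    (fun result (i : Nat) =>
      result ++ [pvChase nums result (PySem.List.pyGetD nums (i : Int) 0) ((i : Int) - 1) nums.length])
    []

-- ===== PRECONDITION & SPEC =====
def Spec_indexes_of_next_smaller_element_to_left (nums : List Int) (out : List Int) : Prop := out = indexes_of_next_smaller_element_to_left_alt nums
instance (nums : List Int) (out : List Int) : Decidable (Spec_indexes_of_next_smaller_element_to_left nums out) := by unfold Spec_indexes_of_next_smaller_element_to_left; infer_instance

-- ===== CLAIM (what is proved, stated in full; the proofs are below) =====
def Claim_equal_indexes_of_next_smaller_element_to_left : Prop := ∀ (nums : List Int), Dom_indexes_of_next_smaller_element_to_left nums → Spec_indexes_of_next_smaller_element_to_left nums (indexes_of_next_smaller_element_to_left nums)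

-- ===== LEMMAS AND PROOFS =====

-- reference value: index of the nearest element strictly smaller than x among indices < i, else -1
def pvPrev (nums : List Int) (x : Int) : Nat → Int
  | 0 => -1
  | j + 1 => if nums.getD j 0 < x then (j : Int) else pvPrev nums x j

lemma pvPrev_bounds (nums : List Int) (x : Int) (i : Nat) :
    -1 ≤ pvPrev nums x i ∧ pvPrev nums x i < (i : Int) := by
  induction i with
  | zero => simp [pvPrev]
  | succ j ih =>
    simp only [pvPrev]
    split_ifs with h
    · constructor <;> omega
    · exact ⟨ih.1, by have := ih.2; push_cast; omega⟩

lemma pvPrev_gap (nums : List Int) (y : Int) (j k : Nat)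
    (h1 : pvPrev nums y j < (k : Int)) (h2 : k < j) : nums.getD k 0 ≥ y := by
  induction j with
  | zero => omega
  | succ j' ih =>
    simp only [pvPrev] at h1
    split_ifs at h1 with h
    · omega
    · rcases Nat.lt_succ_iff_lt_or_eq.mp h2 with h' | h'
      · exact ih h1 h'
      · subst h'; omega

lemma pvPrev_congr (nums : List Int) (x : Int) (j m : Nat) (hm : m ≤ j)
    (h : ∀ k, m ≤ k → k < j → nums.getD k 0 ≥ x) :
    pvPrev nums x j = pvPrev nums x m := by
  induction j with
  | zero =>
    have : m = 0 := by omega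
    subst this; rfl
  | succ j' ih =>
    rcases Nat.lt_succ_iff_lt_or_eq.mp (Nat.lt_succ_of_le hm) with h' | h'
    · have hj : nums.getD j' 0 ≥ x := h j' (by omega) (by omega)
      simp only [pvPrev]
      rw [if_neg (by omega)]
      exact ih (by omega) (fun k hk1 hk2 => h k hk1 (by omega))
    · subst h'; rfl

-- the "skip" step: if nums[j] ≥ x then chasing to the previous-smaller of nums[j] loses nothing
lemma pvPrev_skip (nums : List Int) (x : Int) (j : Nat) (h : nums.getD j 0 ≥ x) :
    pvPrev nums x (j + 1) = pvPrev nums x ((pvPrev nums (nums.getD j 0) j + 1).toNat) := by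
  have hb := pvPrev_bounds nums (nums.getD j 0) j
  set q := pvPrev nums (nums.getD j 0) j with hq
  have hm : ((q + 1).toNat : Int) = q + 1 := by omega
  have hmj : (q + 1).toNat ≤ j := by omega
  have step : pvPrev nums x (j + 1) = pvPrev nums x j := by
    simp only [pvPrev]; rw [if_neg (by omega)]
  rw [step]
  exact pvPrev_congr nums x j _ hmj (fun k hk1 hk2 => by
    have : q < (k : Int) := by omega
    exact le_trans h (pvPrev_gap nums (nums.getD j 0) j k this hk2))

-- B's jump loop computes pvPrev, given the already-built prefix of result is correct
lemma pvChase_eq (nums result : List Int) (x : Int) (i : Nat)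
    (H : ∀ k, k < i → result.getD k 0 = pvPrev nums (nums.getD k 0) k) :
    ∀ (fuel : Nat) (p : Int), -1 ≤ p → p < (i : Int) → p < (fuel : Int) →
      pvChase nums result x p fuel = pvPrev nums x (p + 1).toNat := by
  intro fuel
  induction fuel with
  | zero =>
    intro p h1 _ h3
    have : p = -1 := by omega
    subst this
    simp [pvChase, pvPrev]
  | succ f ih =>
    intro p h1 h2 h3
    by_cases hp : p = -1
    · subst hp; simp [pvChase, pvPrev]
    · have hp0 : 0 ≤ p := by omega
      obtain ⟨pn, hpn⟩ := Int.eq_ofNat_of_zero_le hp0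
      subst hpn
      have hpi : pn < i := by exact_mod_cast h2
      simp only [pvChase, PySem.List.pyGetD_natCast]
      by_cases hge : nums.getD pn 0 ≥ x
      · rw [if_pos ⟨by omega, hge⟩, H pn hpi]
        have hb := pvPrev_bounds nums (nums.getD pn 0) pn
        rw [ih _ hb.1 (by omega) (by omega)]
        have : ((pn : Int) + 1).toNat = pn + 1 := by omega
        rw [this, pvPrev_skip nums x pn hge]
      · rw [if_neg (by intro hc; exact hge hc.2)]
        have : ((pn : Int) + 1).toNat = pn + 1 := by omega
        rw [this]
        simp only [pvPrev]
        rw [if_pos (by omega)]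

-- B's fold builds exactly the pvPrev table
lemma pvAlt_prefix (nums : List Int) :
    ∀ m, m ≤ nums.length →
      (List.range m).foldl
        (fun result (i : Nat) =>
          result ++ [pvChase nums result (PySem.List.pyGetD nums (i : Int) 0) ((i : Int) - 1) nums.length])
        []
      = (List.range m).map (fun k => pvPrev nums (nums.getD k 0) k) := by
  intro m
  induction m with
  | zero => intro _; simp
  | succ m ih =>
    intro hm
    rw [List.range_succ, List.foldl_append, List.map_append, ih (by omega)]
    simp only [List.foldl_cons, List.foldl_nil, List.map_cons, List.map_nil]
    congr 1
    congr 1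
    have H : ∀ k, k < m →
        ((List.range m).map (fun k => pvPrev nums (nums.getD k 0) k)).getD k 0
          = pvPrev nums (nums.getD k 0) k := by
      intro k hk
      exact PySem.List.getD_map_range _ m k 0 hk
    rw [PySem.List.pyGetD_natCast]
    rw [pvChase_eq nums _ (nums.getD m 0) m H nums.length ((m : Int) - 1) (by omega)
        (by omega) (by omega)]
    have : ((m : Int) - 1 + 1).toNat = m := by omega
    rw [this]

-- top index of a stack, -1 when empty (what A reads off after popping)
def pvHeadIdx : List (Int × Int) → Int
  | [] => -1
  | (_, j) :: _ => j

lemma pvPopGE_popGE (x c : Int) (hxc : x ≤ c) (s : List (Int × Int)) :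
    pvPopGE x (pvPopGE c s) = pvPopGE x s := by
  induction s with
  | nil => rfl
  | cons hd tl ih =>
    obtain ⟨v, j⟩ := hd
    by_cases h1 : v ≥ c
    · have hx : v ≥ x := by omega
      simp only [pvPopGE, if_pos h1, if_pos hx]
      exact ih
    · have h2 : pvPopGE c ((v, j) :: tl) = (v, j) :: tl := by
        simp [pvPopGE, h1]
      rw [h2]

-- the one-step normal form of A's loop body
lemma pvStepA_eq (nums : List Int) (result : List Int) (stack : List (Int × Int)) (i : Int) :
    pvStepA nums (result, stack) i =
      (PySem.List.pySetD result i
          (pvHeadIdx (pvPopGE (PySem.List.pyGetD nums i 0) stack)),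
        (PySem.List.pyGetD nums i 0, i) :: pvPopGE (PySem.List.pyGetD nums i 0) stack) := by
  cases stack with
  | nil => rfl
  | cons hd tl =>
    obtain ⟨v, j⟩ := hd
    simp only [pvStepA, pvPopGE]
    set curr := PySem.List.pyGetD nums i 0 with hc
    by_cases h : v < curr
    · rw [if_pos h, if_neg (by omega)]
      simp [pvHeadIdx]
    · rw [if_neg h, if_pos (by omega)]
      cases hpop : pvPopGE curr tl with
      | nil => simp [pvHeadIdx]
      | cons hd' tl' => obtain ⟨v', j'⟩ := hd'; simp [pvHeadIdx]

-- the stack invariant: popping everything ≥ x exposes exactly pvPrev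
def pvInvS (nums : List Int) (i : Nat) (stack : List (Int × Int)) : Prop :=
  ∀ x, pvHeadIdx (pvPopGE x stack) = pvPrev nums x i

lemma pvInvS_step (nums : List Int) (i : Nat) (stack : List (Int × Int))
    (h : pvInvS nums i stack) :
    pvInvS nums (i + 1) ((nums.getD i 0, (i : Int)) :: pvPopGE (nums.getD i 0) stack) := by
  intro x
  simp only [pvPopGE]
  split_ifs with hge
  · rw [pvPopGE_popGE x (nums.getD i 0) hge stack, h x]
    simp only [pvPrev]
    rw [if_neg (by omega)]
  · simp only [pvHeadIdx, pvPrev]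
    rw [if_pos (by omega)]

-- A's fold invariant: after m steps the first m result slots hold pvPrev, the rest are -1,
-- and the stack satisfies pvInvS
lemma pvA_prefix (nums : List Int) :
    ∀ m, m ≤ nums.length →
      ∃ st,
        (List.range m).foldl (fun acc (k : Nat) => pvStepA nums acc (k : Int))
            (List.replicate nums.length (-1), [])
          = ((List.range m).map (fun k => pvPrev nums (nums.getD k 0) k)
              ++ List.replicate (nums.length - m) (-1), st)
          ∧ pvInvS nums m st := by
  intro m
  induction m with
  | zero =>
    intro _
    refine ⟨[], by simp, ?_⟩
    intro x; simp [pvPopGE, pvHeadIdx, pvPrev]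
  | succ m ih =>
    intro hm
    obtain ⟨st, hfold, hinv⟩ := ih (by omega)
    rw [List.range_succ, List.foldl_append, hfold]
    simp only [List.foldl_cons, List.foldl_nil]
    rw [pvStepA_eq]
    rw [PySem.List.pyGetD_natCast, PySem.List.pySetD_natCast]
    refine ⟨(nums.getD m 0, (m : Int)) :: pvPopGE (nums.getD m 0) st, ?_, ?_⟩
    · simp only [Prod.mk.injEq]
      refine ⟨?_, trivial⟩
      have hlen : ((List.range m).map (fun k => pvPrev nums (nums.getD k 0) k)).length = m := by
        simp
      have hrep : List.replicate (nums.length - m) (-1 : Int)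
          = -1 :: List.replicate (nums.length - (m + 1)) (-1) := by
        have : nums.length - m = (nums.length - (m + 1)) + 1 := by omega
        rw [this, List.replicate_succ]
      rw [hrep, List.set_append, if_neg (by omega), hlen]
      have : m - m = 0 := by omega
      rw [this, List.set_cons_zero, hinv (nums.getD m 0)]
      simp
    · have := pvInvS_step nums m st hinv
      exact this

-- ===== VERDICT (by name: the statement is the Claim_ definition above) =====
theorem indexes_of_next_smaller_element_to_left_spec : Claim_equal_indexes_of_next_smaller_element_to_left := by
  intro nums _
  unfold Spec_indexes_of_next_smaller_element_to_left
  unfold indexes_of_next_smaller_element_to_left indexes_of_next_smaller_element_to_left_alt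
  rw [pvAlt_prefix nums nums.length (le_refl _)]
  rw [PySem.List.pyRange_zero_natCast, List.foldl_map]
  obtain ⟨st, hfold, _⟩ := pvA_prefix nums nums.length (le_refl _)
  rw [hfold]
  simp
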